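-- pv_equiv track=rewrite | github.com/developmentsmn/coding-problems | other/wateringFlowers.py | friendsWatering
-- ===== SOURCE A (Python) =====
-- def friendsWatering(flowers, capacity1:int, capacity2:int) -> int:
--
--     counterR =1
--     counterL =1
--
--     indexR = 0
--     indexL = (len(flowers)-1)
--
--     c1 = capacity1
--     c2 = capacity2
--
--     while( indexR <= indexL):
--
--         requiredR = flowers[indexR]
--         requiredL = flowers[indexL]
--
--         if indexR == indexL:
--
--             if (capacity1+capacity2) < requiredR:
--                 counterR+=1
--         else:
--
--             if requiredR > capacity1:
--                 capacity1 = c1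
--                 counterR+=1
--
--             if requiredL > capacity2:
--                 capacity2 = c2
--                 counterL+=1
--
--             capacity1 = capacity1 - requiredR
--             capacity2 = capacity2 - requiredL
--
--         indexR+=1
--         indexL-=1
--
--
--     return counterR+counterL
-- ===== SOURCE B (Python) =====
-- def _refills(seq, capacity):
--     # Simulate one friend over their flowers: returns (refill count starting at 1, remaining water).
--     count = 1
--     cap = capacity
--     for f in seq:
--         if f > cap:
--             cap = capacity
--             count += 1
--         cap -= f
--     return count, cap
--
--
-- def friendsWatering(flowers, capacity1: int, capacity2: int) -> int:
--     half = len(flowers) // 2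
--     r_count, r_cap = _refills(flowers[:half], capacity1)
--     l_count, l_cap = _refills(flowers[len(flowers) - half:][::-1], capacity2)
--     if len(flowers) % 2 == 1 and r_cap + l_cap < flowers[half]:
--         r_count += 1
--     return r_count + l_count
-- ===== Notes on version B (the rewrite author's own statement) =====
-- stated objective: simpler
-- what changed: Replaces the interleaved two-pointer while-loop over mutable shared state with two independent single-friend passes (a reusable helper iterating directly over a slice each) plus an explicit middle-flower check for odd lengths.
import Mathlib
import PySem

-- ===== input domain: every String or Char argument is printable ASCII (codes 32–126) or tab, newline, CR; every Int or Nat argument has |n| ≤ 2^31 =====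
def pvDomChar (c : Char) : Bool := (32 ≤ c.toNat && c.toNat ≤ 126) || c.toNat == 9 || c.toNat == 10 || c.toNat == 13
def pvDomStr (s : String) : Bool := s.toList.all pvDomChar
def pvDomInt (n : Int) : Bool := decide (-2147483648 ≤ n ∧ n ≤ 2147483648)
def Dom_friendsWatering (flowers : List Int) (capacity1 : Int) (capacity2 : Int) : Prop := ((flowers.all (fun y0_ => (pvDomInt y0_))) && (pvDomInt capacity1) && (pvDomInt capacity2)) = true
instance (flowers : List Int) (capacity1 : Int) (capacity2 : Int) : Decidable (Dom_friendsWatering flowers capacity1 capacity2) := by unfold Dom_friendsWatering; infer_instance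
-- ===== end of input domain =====

-- B replaces A's interleaved two-pointer loop by two independent per-friend passes over a slice
-- each plus an explicit middle check (objective: simpler decomposition; same O(n) cost).

-- ===== PORT A =====
-- A's while-loop; indices always stay in range (0 ≤ indexR ≤ indexL < len), so the
-- pyGetD default 0 is never used.
def pvLoopA (flowers : List Int) (c1 c2 capacity1 capacity2 counterR counterL indexR indexL : Int) : Int :=
  if _h : indexR ≤ indexL then
    let requiredR := PySem.List.pyGetD flowers indexR 0
    let requiredL := PySem.List.pyGetD flowers indexL 0
    if indexR = indexL then
      let counterR' := if capacity1 + capacity2 < requiredR then counterR + 1 else counterR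
      pvLoopA flowers c1 c2 capacity1 capacity2 counterR' counterL (indexR + 1) (indexL - 1)
    else
      let p1 := if requiredR > capacity1 then (c1, counterR + 1) else (capacity1, counterR)
      let p2 := if requiredL > capacity2 then (c2, counterL + 1) else (capacity2, counterL)
      pvLoopA flowers c1 c2 (p1.1 - requiredR) (p2.1 - requiredL) p1.2 p2.2 (indexR + 1) (indexL - 1)
  else
    counterR + counterL
termination_by (indexL - indexR + 1).toNat
decreasing_by all_goals simp_wf; omega

def friendsWatering (flowers : List Int) (capacity1 : Int) (capacity2 : Int) : Int :=
  pvLoopA flowers capacity1 capacity2 capacity1 capacity2 1 1 0 ((flowers.length : Int) - 1)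

-- ===== PORT B =====
-- Source B's _refills helper: one friend over their slice, starting count 1.
def pvRefills (seq : List Int) (capacity : Int) : Int × Int :=
  seq.foldl (fun st f =>
    let q := if f > st.2 then (st.1 + 1, capacity) else (st.1, st.2)
    (q.1, q.2 - f)) (1, capacity)

-- slices flowers[:half] / flowers[len-half:][::-1] with Nat bounds = take / drop+reverse;
-- flowers[half] is taken only when len is odd, hence in range: getD default never used.
def friendsWatering_alt (flowers : List Int) (capacity1 : Int) (capacity2 : Int) : Int :=
  let half := flowers.length / 2
  let r := pvRefills (flowers.take half) capacity1
  let l := pvRefills ((flowers.drop (flowers.length - half)).reverse) capacity2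
  let rc := if flowers.length % 2 = 1 ∧ r.2 + l.2 < flowers.getD half 0 then r.1 + 1 else r.1
  rc + l.1

-- ===== PRECONDITION & SPEC =====
def Spec_friendsWatering (flowers : List Int) (capacity1 : Int) (capacity2 : Int) (out : Int) : Prop := out = friendsWatering_alt flowers capacity1 capacity2
instance (flowers : List Int) (capacity1 : Int) (capacity2 : Int) (out : Int) : Decidable (Spec_friendsWatering flowers capacity1 capacity2 out) := by unfold Spec_friendsWatering; infer_instance

-- ===== CLAIM (what is proved, stated in full; the proofs are below) =====
def Claim_equal_friendsWatering : Prop := ∀ (flowers : List Int) (capacity1 : Int) (capacity2 : Int), Dom_friendsWatering flowers capacity1 capacity2 → Spec_friendsWatering flowers capacity1 capacity2 (friendsWatering flowers capacity1 capacity2)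

-- ===== LEMMAS AND PROOFS =====

-- B's fold step, named for the invariant lemma.
def pvStep (capacity : Int) (st : Int × Int) (f : Int) : Int × Int :=
  let q := if f > st.2 then (st.1 + 1, capacity) else (st.1, st.2)
  (q.1, q.2 - f)

theorem pvRefills_eq_foldl (seq : List Int) (capacity : Int) :
    pvRefills seq capacity = seq.foldl (pvStep capacity) (1, capacity) := rfl

-- Pair phase of A's loop: as long as indexR < indexL, the two friends update
-- independently, so the loop equals two folds over the visited elements.
theorem pvLoopA_pairs (flowers : List Int) (c1 c2 : Int) :
    ∀ (r lv : List Int) (i j : Int) (s1 s2 : Int × Int),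
      r.length = lv.length →
      (∀ k : Nat, k < r.length → PySem.List.pyGetD flowers (i + k) 0 = r.getD k 0) →
      (∀ k : Nat, k < lv.length → PySem.List.pyGetD flowers (j - k) 0 = lv.getD k 0) →
      2 * (r.length : Int) ≤ j - i + 1 →
      pvLoopA flowers c1 c2 s1.2 s2.2 s1.1 s2.1 i j
        = pvLoopA flowers c1 c2 (r.foldl (pvStep c1) s1).2 (lv.foldl (pvStep c2) s2).2
            (r.foldl (pvStep c1) s1).1 (lv.foldl (pvStep c2) s2).1 (i + r.length) (j - r.length) := by
  intro r
  induction r with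
  | nil =>
    intro lv i j s1 s2 hlen hr hl hb
    have hlv : lv = [] := List.eq_nil_of_length_eq_zero hlen.symm
    subst hlv
    simp
  | cons a r' ih =>
    intro lv i j s1 s2 hlen hr hl hb
    cases lv with
    | nil => simp at hlen
    | cons b lv' =>
      simp only [List.length_cons] at hlen hb hr hl
      have hij : i < j := by push_cast at hb; omega
      have ha : PySem.List.pyGetD flowers i 0 = a := by
        have h0 := hr 0 (by omega)
        simpa using h0
      have hbv : PySem.List.pyGetD flowers j 0 = b := by
        have h0 := hl 0 (by omega)
        simpa using h0
      have key : ∀ (s : Int × Int) (c f : Int),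
          ((if f > s.2 then (c, s.1 + 1) else (s.2, s.1)).1 - f = (pvStep c s f).2)
          ∧ ((if f > s.2 then (c, s.1 + 1) else (s.2, s.1)).2 = (pvStep c s f).1) := by
        intro s c f
        by_cases h : f > s.2 <;> simp [pvStep, h]
      have hlen' : r'.length = lv'.length := by omega
      have hr' : ∀ k : Nat, k < r'.length →
          PySem.List.pyGetD flowers ((i + 1) + k) 0 = r'.getD k 0 := by
        intro k hk
        have h0 := hr (k + 1) (by omega)
        have e : i + ((k + 1 : Nat) : Int) = (i + 1) + (k : Int) := by push_cast; ring
        rw [e, List.getD_cons_succ] at h0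
        exact h0
      have hl' : ∀ k : Nat, k < lv'.length →
          PySem.List.pyGetD flowers ((j - 1) - k) 0 = lv'.getD k 0 := by
        intro k hk
        have h0 := hl (k + 1) (by omega)
        have e : j - ((k + 1 : Nat) : Int) = (j - 1) - (k : Int) := by push_cast; ring
        rw [e, List.getD_cons_succ] at h0
        exact h0
      have hb' : 2 * (r'.length : Int) ≤ (j - 1) - (i + 1) + 1 := by push_cast at hb ⊢; omega
      have step := ih lv' (i + 1) (j - 1) (pvStep c1 s1 a) (pvStep c2 s2 b) hlen' hr' hl' hb'
      rw [pvLoopA.eq_def]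
      rw [dif_pos hij.le]
      simp only [ha, hbv, if_neg hij.ne]
      rw [(key s1 c1 a).1, (key s1 c1 a).2, (key s2 c2 b).1, (key s2 c2 b).2]
      rw [step]
      have e1 : (i + 1) + (r'.length : Int) = i + (((a :: r').length : Nat) : Int) := by
        simp only [List.length_cons]; push_cast; ring
      have e2 : (j - 1) - (r'.length : Int) = j - (((a :: r').length : Nat) : Int) := by
        simp only [List.length_cons]; push_cast; ring
      rw [e1, e2]
      simp [List.foldl_cons]


-- ===== VERDICT (by name: the statement is the Claim_ definition above) =====
theorem friendsWatering_spec : Claim_equal_friendsWatering := by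
  intro flowers capacity1 capacity2 _hdom
  unfold Spec_friendsWatering friendsWatering friendsWatering_alt
  have hhalf : flowers.length / 2 ≤ flowers.length := Nat.div_le_self _ _
  have hrlen : (flowers.take (flowers.length / 2)).length = flowers.length / 2 := by
    simp [List.length_take]; omega
  have hlvlen :
      ((flowers.drop (flowers.length - flowers.length / 2)).reverse).length = flowers.length / 2 := by
    simp [List.length_reverse, List.length_drop]; omega
  have hr : ∀ k : Nat, k < (flowers.take (flowers.length / 2)).length →
      PySem.List.pyGetD flowers ((0 : Int) + k) 0 = (flowers.take (flowers.length / 2)).getD k 0 := by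
    intro k hk
    rw [hrlen] at hk
    have hkn : k < flowers.length := lt_of_lt_of_le hk hhalf
    have e : (0 : Int) + (k : Int) = ((k : Nat) : Int) := by ring
    rw [e, PySem.List.pyGetD_natCast]
    rw [List.getD_eq_getElem _ _ hkn, List.getD_eq_getElem _ _ (by rw [hrlen]; exact hk)]
    simp
  have hl : ∀ k : Nat, k < ((flowers.drop (flowers.length - flowers.length / 2)).reverse).length →
      PySem.List.pyGetD flowers (((flowers.length : Int) - 1) - k) 0
        = ((flowers.drop (flowers.length - flowers.length / 2)).reverse).getD k 0 := by
    intro k hk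
    rw [hlvlen] at hk
    have hn1 : 1 ≤ flowers.length := by omega
    have e : ((flowers.length : Int) - 1) - (k : Int) = ((flowers.length - 1 - k : Nat) : Int) := by
      omega
    rw [e, PySem.List.pyGetD_natCast]
    rw [List.getD_eq_getElem _ _ (by omega),
        List.getD_eq_getElem _ _ (by rw [hlvlen]; exact hk)]
    rw [List.getElem_reverse, List.getElem_drop]
    congr 1
    simp [List.length_drop]
    omega
  have hb : 2 * ((flowers.take (flowers.length / 2)).length : Int)
      ≤ ((flowers.length : Int) - 1) - 0 + 1 := by
    rw [hrlen]; omega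
  have key := pvLoopA_pairs flowers capacity1 capacity2
      (flowers.take (flowers.length / 2))
      ((flowers.drop (flowers.length - flowers.length / 2)).reverse)
      0 ((flowers.length : Int) - 1) (1, capacity1) (1, capacity2)
      (hrlen.trans hlvlen.symm) hr hl hb
  simp only [pvRefills_eq_foldl]
  rw [show (pvLoopA flowers capacity1 capacity2 capacity1 capacity2 1 1 0 ((flowers.length : Int) - 1))
        = pvLoopA flowers capacity1 capacity2 ((1 : Int), capacity1).2 ((1 : Int), capacity2).2
            ((1 : Int), capacity1).1 ((1 : Int), capacity2).1 0 ((flowers.length : Int) - 1) from rfl]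
  rw [key, hrlen]
  rcases Nat.mod_two_eq_zero_or_one flowers.length with hpar | hpar
  · -- even length: the loop is already finished, no middle flower
    rw [pvLoopA.eq_def, dif_neg (by omega)]
    rw [if_neg (by simp [hpar])]
  · -- odd length: one middle iteration remains
    have hmid : (0 : Int) + (flowers.length / 2 : Nat)
        = (flowers.length : Int) - 1 - (flowers.length / 2 : Nat) := by omega
    rw [pvLoopA.eq_def, dif_pos (by omega), if_pos hmid]
    have e : (0 : Int) + ((flowers.length / 2 : Nat) : Int) = (((flowers.length / 2 : Nat)) : Int) := by
      ring
    rw [e, PySem.List.pyGetD_natCast]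
    rw [pvLoopA.eq_def, dif_neg (by omega)]
    simp only [hpar]
    simp only [true_and]
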